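-- pv_equiv track=rewrite | github.com/Yolwoocle/tp | tp02/ex04_collier.py | est_collier_valide
-- ===== SOURCE A (Python) =====
-- def est_collier_valide(collier):
--   n0 = 0
--   n1 = 0
--   for perle in collier:
--     if perle == 0:
--       n0 += 1
--     elif perle == 1:
--       n1 += 1
--     else:
--       return False
--   return n0%2 == 0 and n1%2 == 0
-- ===== SOURCE B (Python) =====
-- def est_collier_valide(collier):
--   perles = list(collier)
--   for p in perles:
--     if p not in (0, 1):
--       return False
--   # over 0/1 beads: #ones = sum, #zeros = len - sum, so
--   # both counts are even  <=>  len is even and sum is even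
--   return len(perles) % 2 == 0 and sum(perles) % 2 == 0
-- ===== Notes on version B (the rewrite author's own statement) =====
-- stated objective: alternative
-- what changed: Instead of counting zeros and ones, B validates the beads and then decides via the identity: both counts even iff the necklace length is even and the sum of beads is even (sum = number of ones, zeros = length - ones).
import Mathlib
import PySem

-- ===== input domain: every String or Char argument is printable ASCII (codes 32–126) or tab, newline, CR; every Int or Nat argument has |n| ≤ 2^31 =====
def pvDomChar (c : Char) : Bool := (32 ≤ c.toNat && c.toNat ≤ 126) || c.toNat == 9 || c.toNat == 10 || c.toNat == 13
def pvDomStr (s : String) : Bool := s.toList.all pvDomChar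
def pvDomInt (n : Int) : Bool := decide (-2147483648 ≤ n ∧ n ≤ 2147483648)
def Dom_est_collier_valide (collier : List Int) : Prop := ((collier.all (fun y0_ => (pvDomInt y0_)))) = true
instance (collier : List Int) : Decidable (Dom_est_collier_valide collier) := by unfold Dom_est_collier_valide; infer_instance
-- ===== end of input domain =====

-- B drops A's two counters: it validates the beads and then uses the identity
-- "both counts even iff length even and sum even" (sum of 0/1 beads = number of ones).

-- ===== PORT A =====
-- the loop of A, with accumulators n0 n1 and the early `return False`
def est_collier_valide_loop : List Int → Int → Int → Bool
  | [], n0, n1 => n0 % 2 == 0 && n1 % 2 == 0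
  | perle :: rest, n0, n1 =>
    if perle == 0 then est_collier_valide_loop rest (n0 + 1) n1
    else if perle == 1 then est_collier_valide_loop rest n0 (n1 + 1)
    else false

def est_collier_valide (collier : List Int) : Bool :=
  est_collier_valide_loop collier 0 0

-- ===== PORT B =====
-- the `for p in perles: if p not in (0,1): return False` validation pass of Source B
def est_collier_valide_alt_check : List Int → Bool
  | [] => true
  | p :: rest => if !(p == 0 || p == 1) then false else est_collier_valide_alt_check rest

def est_collier_valide_alt (collier : List Int) : Bool :=
  if est_collier_valide_alt_check collier = false then false
  else ((collier.length : Int) % 2 == 0) && (collier.sum % 2 == 0)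

-- ===== PRECONDITION & SPEC =====
def Spec_est_collier_valide (collier : List Int) (out : Bool) : Prop := out = est_collier_valide_alt collier
instance (collier : List Int) (out : Bool) : Decidable (Spec_est_collier_valide collier out) := by unfold Spec_est_collier_valide; infer_instance

-- ===== CLAIM (what is proved, stated in full; the proofs are below) =====
def Claim_equal_est_collier_valide : Prop := ∀ (collier : List Int), Dom_est_collier_valide collier → Spec_est_collier_valide collier (est_collier_valide collier)

-- ===== LEMMAS AND PROOFS =====
-- loop invariant: A's accumulator loop equals B's validate-then-(length,sum) parity up to the offsets n0, n1
lemma loop_eq (l : List Int) : ∀ (n0 n1 : Int),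
    est_collier_valide_loop l n0 n1 =
      if est_collier_valide_alt_check l = false then false
      else (((n0 + (l.length : Int) - l.sum) % 2 == 0) && ((n1 + l.sum) % 2 == 0)) := by
  induction l with
  | nil => intro n0 n1; simp [est_collier_valide_loop, est_collier_valide_alt_check]
  | cons p rest ih =>
    intro n0 n1
    by_cases h0 : p = 0
    · subst h0
      simp only [est_collier_valide_loop, est_collier_valide_alt_check, ih]
      simp
      ring_nf
    · by_cases h1 : p = 1
      · subst h1
        simp only [est_collier_valide_loop, est_collier_valide_alt_check, ih]
        simp
        ring_nf
      · simp [est_collier_valide_loop, est_collier_valide_alt_check, h0, h1]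

-- ===== VERDICT (by name: the statement is the Claim_ definition above) =====
theorem est_collier_valide_spec : Claim_equal_est_collier_valide := by
  intro collier _
  unfold Spec_est_collier_valide est_collier_valide est_collier_valide_alt
  rw [loop_eq]
  by_cases h : est_collier_valide_alt_check collier = false
  · simp [h]
  · rw [if_neg h, if_neg h, Bool.eq_iff_iff]
    simp
    omega
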